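-- pv_equiv track=rewrite | github.com/dawsh2/ADMF-PC | ADMF-PC/src/backtest/backtest_engine.py | _align_market_data
-- ===== SOURCE A (Python) =====
-- from typing import Dict, Any, List, Optional, Set
--
-- def _align_market_data(symbol_data: Dict[str, Any]) -> List[tuple]:
--     """Align market data across symbols."""
--     # Simplified implementation
--     aligned_data = []
--
--     # Get all timestamps
--     all_timestamps = set()
--     for symbol, data in symbol_data.items():
--         all_timestamps.update(data.keys())
--
--     # Sort timestamps
--     sorted_timestamps = sorted(all_timestamps)
--
--     # Create aligned data
--     for timestamp in sorted_timestamps: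
--         bar_data = {}
--         for symbol, data in symbol_data.items():
--             if timestamp in data:
--                 bar_data[symbol] = data[timestamp]
--
--         if bar_data:  # Only include if we have data for at least one symbol
--             aligned_data.append((timestamp, bar_data))
--
--     return aligned_data
-- ===== SOURCE B (Python) =====
-- def _align_market_data(symbol_data):
--     """Align market data across symbols: single pass grouping by timestamp."""
--     groups = {}
--     for symbol, data in symbol_data.items():
--         for timestamp, value in data.items():
--             groups.setdefault(timestamp, {})[symbol] = value
--     return sorted(groups.items(), key=lambda kv: kv[0])
-- ===== Notes on version B (the rewrite author's own statement) =====
-- stated objective: faster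
-- what changed: Instead of collecting all timestamps into a set and then rescanning every symbol's dict for every timestamp, B groups all entries into a timestamp-keyed dict in one pass over the data and sorts its items; Pre_ excludes association lists with duplicate outer or inner keys, on which the list does not represent a Python dict faithfully (Python's dict constructor would have collapsed them).
import Mathlib
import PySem

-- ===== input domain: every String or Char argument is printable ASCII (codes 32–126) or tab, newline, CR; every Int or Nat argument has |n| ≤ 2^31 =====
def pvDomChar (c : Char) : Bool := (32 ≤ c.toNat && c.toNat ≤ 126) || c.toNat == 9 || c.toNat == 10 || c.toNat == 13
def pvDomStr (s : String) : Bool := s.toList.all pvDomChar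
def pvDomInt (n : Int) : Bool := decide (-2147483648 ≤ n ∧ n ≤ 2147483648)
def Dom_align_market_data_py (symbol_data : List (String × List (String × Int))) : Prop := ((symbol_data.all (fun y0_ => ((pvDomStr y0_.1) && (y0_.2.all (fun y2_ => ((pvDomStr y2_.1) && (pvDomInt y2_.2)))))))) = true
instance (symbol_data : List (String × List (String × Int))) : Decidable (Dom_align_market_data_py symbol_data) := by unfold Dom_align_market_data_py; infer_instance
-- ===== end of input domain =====

-- B replaces A's "collect all timestamps, then rescan every symbol per timestamp" with a single
-- grouping pass into a timestamp-keyed dict followed by one sort of its items (faster: asymptotic).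


-- ===== PORT A =====
def align_market_data_py (symbol_data : List (String × List (String × Int))) : List (String × (List (String × Int))) :=
  -- all_timestamps = set(); for symbol, data in symbol_data.items(): all_timestamps.update(data.keys())
  let all_timestamps : PySem.Set String :=
    symbol_data.foldl (fun acc p => PySem.Set.update acc (p.2.map (·.1))) PySem.Set.empty
  -- sorted_timestamps = sorted(all_timestamps)
  let sorted_timestamps := PySem.List.sorted all_timestamps (fun x => x) false
  -- for timestamp in sorted_timestamps: bar_data = {}; for symbol, data … ; if bar_data: append
  sorted_timestamps.foldl (fun aligned ts =>
    let bar_data : PySem.Dict String Int :=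
      symbol_data.foldl (fun bar p =>
        match (PySem.Dict.mk p.2).get? ts with   -- 'if timestamp in data: bar_data[symbol] = data[timestamp]'
        | some v => bar.insert p.1 v
        | none => bar) PySem.Dict.empty
    if bar_data.items.isEmpty then aligned else aligned ++ [(ts, bar_data.items)]) []

-- ===== PORT B =====
def align_market_data_py_alt (symbol_data : List (String × List (String × Int))) : List (String × (List (String × Int))) :=
  -- groups = {}; for symbol, data: for timestamp, value: groups.setdefault(timestamp, {})[symbol] = value
  let groups : PySem.Dict String (PySem.Dict String Int) :=
    symbol_data.foldl (fun g p =>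
      p.2.foldl (fun g q => g.modify q.1 PySem.Dict.empty (fun d => d.insert p.1 q.2)) g)
      PySem.Dict.empty
  -- return sorted(groups.items(), key=lambda kv: kv[0])
  (PySem.List.sorted groups.items (fun kv => kv.1) false).map (fun kv => (kv.1, kv.2.items))

-- ===== PRECONDITION & SPEC =====
-- Pre_ excludes association lists with duplicate outer or inner keys: both levels are Python
-- dicts, and an assoc list with repeated keys does not represent any Python dict faithfully
-- (Python's dict would have collapsed the duplicates before A ever ran).
def Pre_align_market_data_py (symbol_data : List (String × List (String × Int))) : Prop :=
  (symbol_data.map (·.1)).Nodup ∧ ∀ p ∈ symbol_data, (p.2.map (·.1)).Nodup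
instance (symbol_data : List (String × List (String × Int))) : Decidable (Pre_align_market_data_py symbol_data) := by unfold Pre_align_market_data_py; infer_instance

def pvWitness_align_market_data_py : (List (String × List (String × Int))) :=
  [("AAPL", [("t1", 10), ("t2", 11)]), ("MSFT", [("t2", 20), ("t3", 21)])]

def Spec_align_market_data_py (symbol_data : List (String × List (String × Int))) (out : List (String × (List (String × Int)))) : Prop := out = align_market_data_py_alt symbol_data
instance (symbol_data : List (String × List (String × Int))) (out : List (String × (List (String × Int)))) : Decidable (Spec_align_market_data_py symbol_data out) := by unfold Spec_align_market_data_py; infer_instance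

-- ===== CLAIM (what is proved, stated in full; the proofs are below) =====
def Claim_equal_align_market_data_py : Prop := ∀ (symbol_data : List (String × List (String × Int))), Dom_align_market_data_py symbol_data → Pre_align_market_data_py symbol_data → Spec_align_market_data_py symbol_data (align_market_data_py symbol_data)

-- ===== LEMMAS AND PROOFS =====

-- Abbreviations for the loop bodies shared by the proofs (unfold to exactly the ports' folds).
def pvStepA (ts : String) (bar : PySem.Dict String Int) (p : String × List (String × Int)) : PySem.Dict String Int :=
  match (PySem.Dict.mk p.2).get? ts with
  | some v => bar.insert p.1 v
  | none => bar

def pvBar (symbol_data : List (String × List (String × Int))) (ts : String) : PySem.Dict String Int :=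
  symbol_data.foldl (pvStepA ts) PySem.Dict.empty

def pvGroups (symbol_data : List (String × List (String × Int))) : PySem.Dict String (PySem.Dict String Int) :=
  symbol_data.foldl (fun g p =>
    p.2.foldl (fun g q => g.modify q.1 PySem.Dict.empty (fun d => d.insert p.1 q.2)) g)
    PySem.Dict.empty

def pvAllTs (symbol_data : List (String × List (String × Int))) : PySem.Set String :=
  symbol_data.foldl (fun acc p => PySem.Set.update acc (p.2.map (·.1))) PySem.Set.empty

-- A fold of inner modifies at keys other than ts leaves the entry at ts alone.
theorem pv_getD_inner_not_mem (l : List (String × Int)) (s ts : String)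
    (g : PySem.Dict String (PySem.Dict String Int)) (h : ts ∉ l.map (·.1)) :
    (l.foldl (fun g q => g.modify q.1 PySem.Dict.empty (fun d => d.insert s q.2)) g).getD ts PySem.Dict.empty
      = g.getD ts PySem.Dict.empty := by
  induction l generalizing g with
  | nil => rfl
  | cons q rest ih =>
    simp only [List.map_cons, List.mem_cons, not_or] at h
    rw [List.foldl_cons, ih _ h.2, PySem.Dict.getD_modify_of_ne _ _ _ h.1]

-- One symbol's inner pass changes the group at ts exactly as A's per-symbol step does.
theorem pv_getD_inner (l : List (String × Int)) (s ts : String)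
    (g : PySem.Dict String (PySem.Dict String Int)) (hnd : (l.map (·.1)).Nodup) :
    (l.foldl (fun g q => g.modify q.1 PySem.Dict.empty (fun d => d.insert s q.2)) g).getD ts PySem.Dict.empty
      = pvStepA ts (g.getD ts PySem.Dict.empty) (s, l) := by
  induction l generalizing g with
  | nil => rfl
  | cons q rest ih =>
    obtain ⟨k, v⟩ := q
    simp only [List.map_cons, List.nodup_cons] at hnd
    rw [List.foldl_cons]
    by_cases hts : k = ts
    · subst hts
      rw [pv_getD_inner_not_mem rest s k _ hnd.1, PySem.Dict.getD_modify_self]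
      simp [pvStepA, PySem.Dict.get?_mk_cons]
    · rw [ih _ hnd.2]
      have hg : (g.modify k PySem.Dict.empty (fun d => d.insert s v)).getD ts PySem.Dict.empty
          = g.getD ts PySem.Dict.empty :=
        PySem.Dict.getD_modify_of_ne _ _ _ (fun e => hts e.symm)
      simp [pvStepA, PySem.Dict.get?_mk_cons, show (k == ts) = false by simp [hts], hg]

-- The grouping fold, read at one timestamp, IS A's inner bar_data fold.
theorem pv_getD_outer (sd : List (String × List (String × Int))) (ts : String)
    (g : PySem.Dict String (PySem.Dict String Int)) (b : PySem.Dict String Int)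
    (hin : ∀ p ∈ sd, (p.2.map (·.1)).Nodup) (h : g.getD ts PySem.Dict.empty = b) :
    (sd.foldl (fun g p =>
        p.2.foldl (fun g q => g.modify q.1 PySem.Dict.empty (fun d => d.insert p.1 q.2)) g) g).getD ts PySem.Dict.empty
      = sd.foldl (pvStepA ts) b := by
  induction sd generalizing g b with
  | nil => exact h
  | cons p rest ih =>
    rw [List.foldl_cons, List.foldl_cons]
    apply ih _ _ (fun p hp => hin p (by simp [hp]))
    rw [pv_getD_inner p.2 p.1 ts g (hin p (by simp)), h]

theorem pv_keys_outer (sd : List (String × List (String × Int)))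
    (g : PySem.Dict String (PySem.Dict String Int)) :
    (sd.foldl (fun g p =>
        p.2.foldl (fun g q => g.modify q.1 PySem.Dict.empty (fun d => d.insert p.1 q.2)) g) g).keys
      = sd.foldl (fun acc p => PySem.Set.update acc (p.2.map (·.1))) g.keys := by
  induction sd generalizing g with
  | nil => rfl
  | cons p rest ih =>
    rw [List.foldl_cons, List.foldl_cons, ih,
      PySem.Dict.keys_foldl_modify_key p.2 (·.1) PySem.Dict.empty (fun _ q => fun d => d.insert p.1 q.2) g]

theorem pv_nodup_keys_outer (sd : List (String × List (String × Int)))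
    (g : PySem.Dict String (PySem.Dict String Int)) (h : g.keys.Nodup) :
    (sd.foldl (fun g p =>
        p.2.foldl (fun g q => g.modify q.1 PySem.Dict.empty (fun d => d.insert p.1 q.2)) g) g).keys.Nodup := by
  induction sd generalizing g with
  | nil => exact h
  | cons p rest ih =>
    exact ih _ (PySem.Dict.nodup_keys_foldl_modify_key p.2 (·.1) PySem.Dict.empty
      (fun _ q => fun d => d.insert p.1 q.2) g h)

theorem pv_allTs_eq_ofList (sd : List (String × List (String × Int))) :
    pvAllTs sd = PySem.Set.ofList (sd.flatMap (fun p => p.2.map (·.1))) := by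
  rw [PySem.Set.ofList_eq_foldl, List.foldl_flatMap]
  rfl

-- A's bar_data is nonempty for any timestamp occurring in some symbol's data.
theorem pv_bar_nonempty (sd : List (String × List (String × Int))) (ts : String)
    (b : PySem.Dict String Int)
    (h : (∃ p ∈ sd, ts ∈ p.2.map (·.1)) ∨ b.items ≠ []) :
    (sd.foldl (pvStepA ts) b).items ≠ [] := by
  induction sd generalizing b with
  | nil => simpa using h.resolve_left (by simp)
  | cons p rest ih =>
    rw [List.foldl_cons]
    apply ih
    rcases h with ⟨p', hp', hts⟩ | hb
    · rcases List.mem_cons.mp hp' with rfl | hmem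
      · right
        have hcon : (PySem.Dict.mk p'.2).get? ts ≠ none := by
          intro hnone
          exact (PySem.Dict.get?_eq_none_iff_not_mem_keys _ _).mp hnone
            (by simpa [PySem.Dict.keys] using hts)
        rcases hv : (PySem.Dict.mk p'.2).get? ts with _ | v
        · exact absurd hv hcon
        · simp only [pvStepA, hv]
          exact List.ne_nil_of_mem (PySem.Dict.mem_items_insert_self _ _ _)
      · exact Or.inl ⟨p', hmem, hts⟩
    · right
      rcases hv : (PySem.Dict.mk p.2).get? ts with _ | v
      · simpa only [pvStepA, hv] using hb
      · simp only [pvStepA, hv]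
        exact List.ne_nil_of_mem (PySem.Dict.mem_items_insert_self _ _ _)

-- A's output loop, when no bar_data is empty, is a plain map.
theorem pv_foldl_if_all (S : List String) (f : String → PySem.Dict String Int)
    (acc : List (String × List (String × Int))) (h : ∀ ts ∈ S, (f ts).items ≠ []) :
    S.foldl (fun aligned ts => if (f ts).items.isEmpty then aligned else aligned ++ [(ts, (f ts).items)]) acc
      = acc ++ S.map (fun ts => (ts, (f ts).items)) := by
  induction S generalizing acc with
  | nil => simp
  | cons t rest ih =>
    have ht : (f t).items.isEmpty = false := by
      simp; exact h t (by simp)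
    simp only [List.foldl_cons, ht, if_neg Bool.false_ne_true, List.map_cons]
    rw [ih _ (fun x hx => h x (by simp [hx]))]
    simp

theorem pv_main (sd : List (String × List (String × Int)))
    (_hnd : (sd.map (·.1)).Nodup) (hin : ∀ p ∈ sd, (p.2.map (·.1)).Nodup) :
    align_market_data_py sd = align_market_data_py_alt sd := by
  have hkeys : (pvGroups sd).keys = pvAllTs sd := by
    simpa [pvGroups, pvAllTs] using pv_keys_outer sd PySem.Dict.empty
  have hnodup : (pvGroups sd).keys.Nodup := pv_nodup_keys_outer sd _ (by simp)
  have hgetD : ∀ ts, (pvGroups sd).getD ts PySem.Dict.empty = pvBar sd ts :=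
    fun ts => pv_getD_outer sd ts _ _ hin (PySem.Dict.getD_empty _ _)
  have hpair : (PySem.List.sorted (pvAllTs sd) (fun x => x) false).Pairwise (· < ·) := by
    rw [pv_allTs_eq_ofList]
    exact PySem.List.sorted_ofList_pairwise_lt _
  have hsorted : PySem.List.sorted (pvGroups sd).items (fun kv => kv.1) false
      = (PySem.List.sorted (pvAllTs sd) (fun x => x) false).map
          (fun k => (k, (pvGroups sd).getD k PySem.Dict.empty)) := by
    apply PySem.List.sorted_eq_of_perm_of_pairwise_lt
    · rw [PySem.Dict.items_eq_map_keys _ hnodup PySem.Dict.empty]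
      exact List.Perm.map _ (by rw [← hkeys]; exact PySem.List.sorted_perm _ _ _)
    · exact List.pairwise_map.mpr (by simpa using hpair)
  have hne : ∀ ts ∈ PySem.List.sorted (pvAllTs sd) (fun x => x) false, (pvBar sd ts).items ≠ [] := by
    intro ts hts
    apply pv_bar_nonempty sd ts _ (Or.inl ?_)
    have : ts ∈ pvAllTs sd := (PySem.List.mem_sorted _ _ _ _).mp hts
    rw [pv_allTs_eq_ofList, PySem.Set.mem_ofList] at this
    obtain ⟨p, hp, hmem⟩ := List.mem_flatMap.mp this
    exact ⟨p, hp, hmem⟩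
  show (PySem.List.sorted (pvAllTs sd) (fun x => x) false).foldl
      (fun aligned ts => if (pvBar sd ts).items.isEmpty then aligned else aligned ++ [(ts, (pvBar sd ts).items)]) []
    = (PySem.List.sorted (pvGroups sd).items (fun kv => kv.1) false).map (fun kv => (kv.1, kv.2.items))
  rw [pv_foldl_if_all _ _ _ hne, hsorted, List.map_map]
  simp only [List.nil_append]
  exact List.map_congr_left (fun ts _ => by simp [hgetD ts])

-- ===== VERDICT (by name: the statement is the Claim_ definition above) =====
theorem align_market_data_py_spec : Claim_equal_align_market_data_py := by
  intro sd _ hpre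
  exact pv_main sd hpre.1 hpre.2
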